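-- pv_equiv track=rewrite | github.com/Eben-Success/A2SVOnboarding | codeforces/traffic_light.py | traffic_light
-- ===== SOURCE A (Python) =====
-- def traffic_light(val: str, sym: str) -> int:
--
--     val = val.split(" ")
--     char = val[1]
--
--     sym += sym
--     count = 0
--     max_ = 0
--     idx = 0
--
--     while idx < len(sym):
--         if sym[idx] == char:
--             count = 0
--
--             while idx < len(sym) and sym[idx] != "g":
--                 count += 1
--                 idx += 1
--
--             if count > max_:
--                 max_ = count
--
--         idx += 1
--     return max_
-- ===== SOURCE B (Python) =====
-- def traffic_light(val: str, sym: str) -> int: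
--     char = val.split(" ")[1]
--     sym += sym
--     d = 0      # distance from current position to the next 'g' (or to the end)
--     best = 0
--     for c in reversed(sym):
--         d = 0 if c == "g" else d + 1
--         if c == char:
--             best = max(best, d)
--     return best
-- ===== Notes on version B (the rewrite author's own statement) =====
-- stated objective: alternative
-- what changed: Replaces A's forward scan with a nested inner while (advance to the next 'g' counting steps) by a single reverse pass over the doubled string that maintains the distance-to-next-'g' accumulator and takes the max at each matching position.
import Mathlib
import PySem

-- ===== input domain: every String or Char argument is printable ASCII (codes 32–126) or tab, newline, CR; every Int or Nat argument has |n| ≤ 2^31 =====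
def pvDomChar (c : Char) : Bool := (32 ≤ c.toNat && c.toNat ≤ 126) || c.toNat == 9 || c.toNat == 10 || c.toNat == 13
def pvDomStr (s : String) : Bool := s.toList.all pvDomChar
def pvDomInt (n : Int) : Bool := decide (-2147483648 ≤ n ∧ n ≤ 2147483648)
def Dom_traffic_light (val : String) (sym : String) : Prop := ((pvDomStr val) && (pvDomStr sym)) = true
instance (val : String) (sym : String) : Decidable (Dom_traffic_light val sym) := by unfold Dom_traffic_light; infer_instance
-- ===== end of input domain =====

-- B replaces A's forward scan with a nested inner while by a single reverse pass keeping a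
-- distance-to-next-'g' accumulator (alternative decomposition, same cost).

-- ===== PORT A =====

-- inner while: advance while in range and not 'g', counting steps; returns (count, remaining list)
def tlInner (r : List Char) (count : Int) : Int × List Char :=
  match r with
  | [] => (count, [])
  | c :: rest => if c ≠ 'g' then tlInner rest (count + 1) else (count, c :: rest)

theorem tlInner_len_le (r : List Char) (count : Int) : (tlInner r count).2.length ≤ r.length := by
  induction r generalizing count with
  | nil => simp [tlInner]
  | cons c rest ih =>
    simp only [tlInner]
    split
    · exact le_trans (ih _) (by simp)
    · simp

-- outer while over the remaining (doubled) string
def tlLoop (char : String) (r : List Char) (max_ : Int) : Int :=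
  match r with
  | [] => max_
  | c :: rest =>
    if String.ofList [c] = char then
      let p := tlInner (c :: rest) 0
      tlLoop char (p.2.drop 1) (if p.1 > max_ then p.1 else max_)
    else
      tlLoop char rest max_
termination_by r.length
decreasing_by
  · have := tlInner_len_le (c :: rest) 0
    simp only [List.length_drop]
    simp [List.length_cons] at this ⊢
    omega
  · simp

def traffic_light (val : String) (sym : String) : Int :=
  let parts := (PySem.Str.split? val " ").getD []
  let char := (PySem.List.pyGet? parts 1).getD ""   -- Pre_ guarantees the index is in range
  tlLoop char (sym.toList ++ sym.toList) 0

-- ===== PORT B =====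

-- reverse pass: returns (d, best) where d = distance to next 'g' (or to end), best = running max
def tlRev (char : String) (r : List Char) : Int × Int :=
  match r with
  | [] => (0, 0)
  | c :: rest =>
    let p := tlRev char rest
    let d := if c = 'g' then 0 else p.1 + 1
    let best := if String.ofList [c] = char then max p.2 d else p.2
    (d, best)

def traffic_light_alt (val : String) (sym : String) : Int :=
  let parts := (PySem.Str.split? val " ").getD []
  let char := (PySem.List.pyGet? parts 1).getD ""
  (tlRev char (sym.toList ++ sym.toList)).2

-- ===== PRECONDITION & SPEC =====
-- A raises IndexError at val.split(" ")[1] when the split yields fewer than two pieces; Pre_ excludes exactly those inputs.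
def Pre_traffic_light (val : String) (sym : String) : Prop :=
  2 ≤ ((PySem.Str.split? val " ").getD []).length
instance (val : String) (sym : String) : Decidable (Pre_traffic_light val sym) := by
  unfold Pre_traffic_light; infer_instance

def pvWitness_traffic_light : String × String := ("1 r", "rggry")

def Spec_traffic_light (val : String) (sym : String) (out : Int) : Prop := out = traffic_light_alt val sym
instance (val : String) (sym : String) (out : Int) : Decidable (Spec_traffic_light val sym out) := by unfold Spec_traffic_light; infer_instance

-- ===== CLAIM (what is proved, stated in full; the proofs are below) =====
def Claim_equal_traffic_light : Prop := ∀ (val : String) (sym : String), Dom_traffic_light val sym → Pre_traffic_light val sym → Spec_traffic_light val sym (traffic_light val sym)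

-- ===== LEMMAS AND PROOFS =====

theorem tlRev_nonneg (char : String) (r : List Char) : 0 ≤ (tlRev char r).1 ∧ 0 ≤ (tlRev char r).2 := by
  induction r with
  | nil => simp [tlRev]
  | cons c rest ih =>
    simp only [tlRev]
    constructor
    · split <;> omega
    · split
      · exact le_max_of_le_left ih.2
      · exact ih.2

theorem tlInner_eq (r : List Char) (count : Int) :
    tlInner r count = (count + (r.takeWhile (· ≠ 'g')).length, r.dropWhile (· ≠ 'g')) := by
  induction r generalizing count with
  | nil => simp [tlInner]
  | cons c rest ih =>
    by_cases h : c = 'g'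
    · simp [tlInner, h, List.takeWhile, List.dropWhile]
    · simp [tlInner, h, List.takeWhile, List.dropWhile, ih]
      omega

-- d of the reverse pass is the length of the non-'g' prefix
theorem tlRev_fst (char : String) (r : List Char) :
    (tlRev char r).1 = ((r.takeWhile (· ≠ 'g')).length : Int) := by
  induction r with
  | nil => simp [tlRev]
  | cons c rest ih =>
    by_cases h : c = 'g'
    · simp [tlRev, h, List.takeWhile]
    · simp [tlRev, h, List.takeWhile, ih]

theorem tlRev_cons_match (char : String) (c : Char) (rest : List Char)
    (hmt : String.ofList [c] = char) :
    (tlRev char (c :: rest)).2 = max (tlRev char rest).2 (tlRev char (c :: rest)).1 := by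
  by_cases h : c = 'g'
  · subst h
    have hg : "g" = char := by simpa using hmt
    simp [tlRev, hg]
  · simp [tlRev, h, hmt]

theorem tlRev_cons_nomatch (char : String) (c : Char) (rest : List Char)
    (hmt : ¬ String.ofList [c] = char) :
    (tlRev char (c :: rest)).2 = (tlRev char rest).2 := by
  simp [tlRev, hmt]

-- the matches A's forward scan skips (inside the non-'g' run and its closing 'g') never beat
-- the distance at the run's head, so the best over the skipped tail bounds the best both ways
theorem tlRev_skip (char : String) (r : List Char) :
    (tlRev char ((r.dropWhile (· ≠ 'g')).drop 1)).2 ≤ (tlRev char r).2 ∧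
      (tlRev char r).2 ≤ max (tlRev char r).1 (tlRev char ((r.dropWhile (· ≠ 'g')).drop 1)).2 := by
  induction r with
  | nil => simp
  | cons c rest ih =>
    by_cases h : c = 'g'
    · have hdw : (c :: rest).dropWhile (· ≠ 'g') = c :: rest := by
        simp [List.dropWhile, h]
      have hb := (tlRev_nonneg char rest).2
      rw [hdw]
      by_cases hm : String.ofList [c] = char <;> simp [tlRev, h] <;> omega
    · have hdw : (c :: rest).dropWhile (· ≠ 'g') = rest.dropWhile (· ≠ 'g') := by
        simp [List.dropWhile, h]
      rw [hdw]
      have h1 : (tlRev char (c :: rest)).1 = (tlRev char rest).1 + 1 := by simp [tlRev, h]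
      by_cases hm : String.ofList [c] = char
      · have h2 := tlRev_cons_match char c rest hm
        rw [h1] at h2
        omega
      · have h2 := tlRev_cons_nomatch char c rest hm
        omega

-- main invariant: A's outer loop computes the max of the carried max_ and B's reverse-pass best
theorem tlLoop_eq (char : String) (r : List Char) (max_ : Int) (hm : 0 ≤ max_) :
    tlLoop char r max_ = max max_ (tlRev char r).2 := by
  suffices H : ∀ (n : Nat) (r : List Char) (max_ : Int), 0 ≤ max_ → r.length ≤ n →
      tlLoop char r max_ = max max_ (tlRev char r).2 from H r.length r max_ hm le_rfl
  intro n
  induction n with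
  | zero =>
    intro r max_ hm hr
    match r with
    | [] => simp [tlLoop, tlRev, hm]
  | succ n ih =>
    intro r max_ hm hr
    match r with
    | [] => simp [tlLoop, tlRev, hm]
    | c :: rest =>
      by_cases hmt : String.ofList [c] = char
      · rw [tlLoop]
        simp only [hmt, if_pos, tlInner_eq]
        have hlen : (((c :: rest).dropWhile (· ≠ 'g')).drop 1).length ≤ n := by
          have h3 : ((c :: rest).dropWhile (· ≠ 'g')).length ≤ rest.length + 1 := by
            simpa using List.length_dropWhile_le (p := fun x => decide ¬ x = 'g') (l := c :: rest)
          simp only [List.length_drop]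
          simp only [List.length_cons] at hr
          omega
        have hcnt : (0 : Int) + (((c :: rest).takeWhile (· ≠ 'g')).length : Int)
            = (tlRev char (c :: rest)).1 := by rw [tlRev_fst]; omega
        have hmax0 : 0 ≤ (if (0 : Int) + (((c :: rest).takeWhile (· ≠ 'g')).length : Int) > max_
            then (0 : Int) + (((c :: rest).takeWhile (· ≠ 'g')).length : Int) else max_) := by
          split <;> omega
        rw [ih _ _ hmax0 hlen]
        have hskip := tlRev_skip char (c :: rest)
        have hrev := tlRev_cons_match char c rest hmt
        have hb0 := (tlRev_nonneg char rest).2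
        rw [hcnt]
        omega
      · rw [tlLoop]
        simp only [hmt, if_neg, not_false_iff]
        rw [ih rest max_ hm (by simp only [List.length_cons] at hr; omega)]
        rw [tlRev_cons_nomatch char c rest hmt]

-- ===== VERDICT (by name: the statement is the Claim_ definition above) =====
theorem traffic_light_spec : Claim_equal_traffic_light := by
  intro val sym _ _
  unfold Spec_traffic_light traffic_light traffic_light_alt
  simp only
  rw [tlLoop_eq _ _ _ le_rfl]
  have := (tlRev_nonneg ((PySem.List.pyGet? ((PySem.Str.split? val " ").getD []) 1).getD "") (sym.toList ++ sym.toList)).2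
  omega
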